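-- pv_equiv track=rewrite | github.com/quantizedeli/v10 | physics_modules/semf_calculator.py | _calculate_valence
-- ===== SOURCE A (Python) =====
-- def _calculate_valence(nucleon_number, magic_numbers):
--     """Valans nükleon sayısı"""
--     # Altındaki magik sayıyı bul
--     below_magic = [m for m in magic_numbers if m <= nucleon_number]
--
--     if not below_magic:
--         return nucleon_number
--
--     last_magic = max(below_magic)
--
--     # Bir sonraki magik sayıyı bul
--     above_magic = [m for m in magic_numbers if m > nucleon_number]
--
--     if not above_magic:
--         return nucleon_number - last_magic
--
--     next_magic = min(above_magic)
--
--     # Hangi magik sayıya daha yakınsa ona göre valans hesapla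
--     dist_to_last = nucleon_number - last_magic
--     dist_to_next = next_magic - nucleon_number
--
--     if dist_to_last <= dist_to_next:
--         return dist_to_last  # Particle
--     else:
--         return -dist_to_next  # Hole (negative indicates holes)
-- ===== SOURCE B (Python) =====
-- def _calculate_valence(nucleon_number, magic_numbers):
--     """Valans nukleon sayisi: sort the magic numbers, then binary-search the
--     boundary index lo = number of magic numbers <= nucleon_number; the
--     neighbours ms[lo-1]/ms[lo] of that boundary are the nearest magic numbers."""
--     ms = sorted(magic_numbers)
--     lo, hi = 0, len(ms)
--     while lo < hi:
--         mid = (lo + hi) // 2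
--         if ms[mid] <= nucleon_number:
--             lo = mid + 1
--         else:
--             hi = mid
--     if lo == 0:
--         return nucleon_number
--     dist_to_last = nucleon_number - ms[lo - 1]
--     if lo == len(ms):
--         return dist_to_last
--     dist_to_next = ms[lo] - nucleon_number
--     return dist_to_last if dist_to_last <= dist_to_next else -dist_to_next
-- ===== Notes on version B (the rewrite author's own statement) =====
-- stated objective: alternative
-- what changed: Replaces the two filtered list comprehensions with max()/min() by sorting the magic numbers and binary-searching the boundary index (count of magic numbers <= nucleon_number); the two sorted neighbours of that boundary are the nearest magic numbers, so no filtering or extremum scan is needed.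
import Mathlib
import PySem

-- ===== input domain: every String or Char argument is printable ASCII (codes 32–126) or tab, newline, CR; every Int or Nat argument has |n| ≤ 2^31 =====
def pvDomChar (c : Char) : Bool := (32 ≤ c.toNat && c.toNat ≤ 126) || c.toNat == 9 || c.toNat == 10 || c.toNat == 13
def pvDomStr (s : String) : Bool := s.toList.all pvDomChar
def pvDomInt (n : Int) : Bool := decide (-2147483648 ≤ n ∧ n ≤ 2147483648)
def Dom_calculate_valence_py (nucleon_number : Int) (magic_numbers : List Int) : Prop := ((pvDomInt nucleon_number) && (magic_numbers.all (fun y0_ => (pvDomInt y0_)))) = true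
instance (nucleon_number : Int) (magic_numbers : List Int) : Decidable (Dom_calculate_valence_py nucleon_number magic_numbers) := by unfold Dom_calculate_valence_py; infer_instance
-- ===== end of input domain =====

-- B replaces A's two filtered comprehensions with max()/min() by sorting the magic
-- numbers and binary-searching the boundary index; objective: alternative algorithm.

-- ===== PORT A =====
def calculate_valence_py (nucleon_number : Int) (magic_numbers : List Int) : Int :=
  let below_magic := magic_numbers.filter (fun m => decide (m ≤ nucleon_number))
  match PySem.List.max? below_magic (fun x => x) with
  | none => nucleon_number            -- 'if not below_magic: return nucleon_number'
  | some last_magic =>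
    let above_magic := magic_numbers.filter (fun m => decide (nucleon_number < m))
    match PySem.List.min? above_magic (fun x => x) with
    | none => nucleon_number - last_magic
    | some next_magic =>
      let dist_to_last := nucleon_number - last_magic
      let dist_to_next := next_magic - nucleon_number
      if dist_to_last ≤ dist_to_next then dist_to_last else -dist_to_next

-- ===== PORT B =====
-- Source B's 'while lo < hi' binary-search loop (ms[mid] is in range whenever
-- lo < hi ≤ len ms, where List.getD is exactly Python's in-range indexing)
def cvSearch (nucleon_number : Int) (ms : List Int) (lo hi : Nat) : Nat :=
  if _h : lo < hi then
    let mid := (lo + hi) / 2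
    if ms.getD mid 0 ≤ nucleon_number then cvSearch nucleon_number ms (mid + 1) hi
    else cvSearch nucleon_number ms lo mid
  else lo
termination_by hi - lo
decreasing_by all_goals omega

def calculate_valence_py_alt (nucleon_number : Int) (magic_numbers : List Int) : Int :=
  let ms := PySem.List.sorted magic_numbers (fun x => x) false
  let lo := cvSearch nucleon_number ms 0 ms.length
  if lo = 0 then nucleon_number
  else
    let dist_to_last := nucleon_number - ms.getD (lo - 1) 0
    if lo = ms.length then dist_to_last
    else
      let dist_to_next := ms.getD lo 0 - nucleon_number
      if dist_to_last ≤ dist_to_next then dist_to_last else -dist_to_next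

-- ===== PRECONDITION & SPEC =====
def Spec_calculate_valence_py (nucleon_number : Int) (magic_numbers : List Int) (out : Int) : Prop := out = calculate_valence_py_alt nucleon_number magic_numbers
instance (nucleon_number : Int) (magic_numbers : List Int) (out : Int) : Decidable (Spec_calculate_valence_py nucleon_number magic_numbers out) := by unfold Spec_calculate_valence_py; infer_instance

-- ===== CLAIM =====
def Claim_equal_calculate_valence_py : Prop := ∀ (nucleon_number : Int) (magic_numbers : List Int), Dom_calculate_valence_py nucleon_number magic_numbers → Spec_calculate_valence_py nucleon_number magic_numbers (calculate_valence_py nucleon_number magic_numbers)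

-- ===== LEMMAS AND PROOFS =====

-- getElem-monotonicity of a ≤-sorted list
lemma pwMono (ms : List Int) (hpw : List.Pairwise (· ≤ ·) ms)
    {p q : Nat} (hq : q < ms.length) (hpq : p ≤ q) :
    ms[p]'(lt_of_le_of_lt hpq hq) ≤ ms[q] := by
  rcases eq_or_lt_of_le hpq with h | h
  · subst h; exact le_refl _
  · exact List.pairwise_iff_getElem.mp hpw p q _ hq h

-- the binary search returns the boundary index of a ≤-sorted list
lemma cvSearch_spec (n : Int) (ms : List Int) (hpw : List.Pairwise (· ≤ ·) ms) :
    ∀ (lo hi : Nat),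
    lo ≤ hi → hi ≤ ms.length →
    (∀ j (hj : j < ms.length), j < lo → ms[j] ≤ n) →
    (∀ j (hj : j < ms.length), hi ≤ j → n < ms[j]) →
    cvSearch n ms lo hi ≤ ms.length ∧
    (∀ j (hj : j < ms.length), j < cvSearch n ms lo hi → ms[j] ≤ n) ∧
    (∀ j (hj : j < ms.length), cvSearch n ms lo hi ≤ j → n < ms[j]) := by
  intro lo hi
  induction hlh : hi - lo using Nat.strong_induction_on generalizing lo hi with
  | _ d ih =>
    intro hle hhi hbelow habove
    rw [cvSearch]
    by_cases h : lo < hi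
    · simp only [h, dif_pos]
      have hmid : (lo + hi) / 2 < ms.length := by omega
      rw [List.getD_eq_getElem ms 0 hmid]
      by_cases hc : ms[(lo + hi) / 2] ≤ n
      · simp only [hc, if_pos]
        refine ih (hi - ((lo + hi) / 2 + 1)) (by omega) _ _ rfl (by omega) hhi ?_ habove
        intro j hj hjlt
        exact le_trans (pwMono ms hpw hmid (by omega)) hc
      · simp only [hc, if_neg, not_false_iff]
        refine ih ((lo + hi) / 2 - lo) (by omega) _ _ rfl (by omega) (by omega) hbelow ?_
        intro j hj hjge
        exact lt_of_lt_of_le (by omega : n < ms[(lo + hi) / 2]'hmid) (pwMono ms hpw hj hjge)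
    · simp only [h, dif_neg, not_false_iff]
      have heq : lo = hi := by omega
      subst heq
      exact ⟨hhi, hbelow, habove⟩

-- value of PySem's max()/min() (identity key) from a membership + bound certificate
lemma max?_id_eq_some_of (l : List Int) (m : Int) (hm : m ∈ l)
    (hmax : ∀ y ∈ l, y ≤ m) : PySem.List.max? l (fun x => x) = some m := by
  cases h : PySem.List.max? l (fun x => x) with
  | none =>
    rw [PySem.List.max?_eq_none_iff] at h
    subst h; cases hm
  | some m' =>
    have hmem := PySem.List.max?_mem h
    have hle := PySem.List.max?_isMax h m hm
    exact congrArg some (le_antisymm (hmax m' hmem) hle)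

lemma min?_id_eq_some_of (l : List Int) (m : Int) (hm : m ∈ l)
    (hmin : ∀ y ∈ l, m ≤ y) : PySem.List.min? l (fun x => x) = some m := by
  cases h : PySem.List.min? l (fun x => x) with
  | none =>
    rw [PySem.List.min?_eq_none_iff] at h
    subst h; cases hm
  | some m' =>
    have hmem := PySem.List.min?_mem h
    have hle := PySem.List.min?_isMin h m hm
    exact congrArg some (le_antisymm hle (hmin m' hmem))

-- ===== VERDICT =====
theorem calculate_valence_py_spec : Claim_equal_calculate_valence_py := by
  intro n magic _
  unfold Spec_calculate_valence_py
  simp only [calculate_valence_py, calculate_valence_py_alt]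
  set ms := PySem.List.sorted magic (fun x => x) false with hms
  have hperm : ms.Perm magic := PySem.List.sorted_perm magic (fun x => x) false
  have hpw : List.Pairwise (· ≤ ·) ms := PySem.List.sorted_pairwise magic (fun x => x)
  obtain ⟨hk, hbel, habv⟩ := cvSearch_spec n ms hpw 0 ms.length (Nat.zero_le _) le_rfl
    (by intro j hj hjlt; omega) (by intro j hj hjge; omega)
  set k := cvSearch n ms 0 ms.length with hkdef
  have hmem : ∀ y, y ∈ magic ↔ ∃ (j : Nat) (hj : j < ms.length), ms[j] = y := by
    intro y; rw [← hperm.mem_iff, List.mem_iff_getElem]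
  by_cases hk0 : k = 0
  · -- no magic number ≤ n: A's below_magic is empty, B's boundary is 0
    have hfil : magic.filter (fun m => decide (m ≤ n)) = [] := by
      rw [List.filter_eq_nil_iff]
      intro a ha hd
      obtain ⟨j, hj, hje⟩ := (hmem a).mp ha
      have := habv j hj (by omega)
      simp only [decide_eq_true_eq] at hd
      omega
    rw [hfil, if_pos hk0]
    rw [show PySem.List.max? ([] : List Int) (fun x => x) = none from rfl]
  · have hkpos : 0 < k := Nat.pos_of_ne_zero hk0
    have hk1 : k - 1 < ms.length := by omega
    have hlast : PySem.List.max? (magic.filter (fun m => decide (m ≤ n))) (fun x => x)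
        = some (ms[k-1]'hk1) := by
      apply max?_id_eq_some_of
      · rw [List.mem_filter]
        refine ⟨(hmem _).mpr ⟨k-1, hk1, rfl⟩, ?_⟩
        simp only [decide_eq_true_eq]
        exact hbel (k-1) hk1 (by omega)
      · intro y hy
        rw [List.mem_filter] at hy
        obtain ⟨hy1, hy2⟩ := hy
        simp only [decide_eq_true_eq] at hy2
        obtain ⟨j, hj, hje⟩ := (hmem y).mp hy1
        rcases Nat.lt_or_ge j k with hjk | hjk
        · rw [← hje]; exact pwMono ms hpw hk1 (by omega)
        · exact absurd (habv j hj (by omega)) (by omega)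
    rw [hlast, if_neg hk0, List.getD_eq_getElem ms 0 hk1]
    by_cases hklen : k = ms.length
    · -- no magic number > n: A's above_magic is empty, B takes the lo == len branch
      have hfil : magic.filter (fun m => decide (n < m)) = [] := by
        rw [List.filter_eq_nil_iff]
        intro a ha hd
        obtain ⟨j, hj, hje⟩ := (hmem a).mp ha
        have := hbel j hj (by omega)
        simp only [decide_eq_true_eq] at hd
        omega
      rw [hfil, if_pos hklen]
      rw [show PySem.List.min? ([] : List Int) (fun x => x) = none from rfl]
    · have hklt : k < ms.length := by omega
      have hnext : PySem.List.min? (magic.filter (fun m => decide (n < m))) (fun x => x)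
          = some (ms[k]'hklt) := by
        apply min?_id_eq_some_of
        · rw [List.mem_filter]
          refine ⟨(hmem _).mpr ⟨k, hklt, rfl⟩, ?_⟩
          simp only [decide_eq_true_eq]
          exact habv k hklt le_rfl
        · intro y hy
          rw [List.mem_filter] at hy
          obtain ⟨hy1, hy2⟩ := hy
          simp only [decide_eq_true_eq] at hy2
          obtain ⟨j, hj, hje⟩ := (hmem y).mp hy1
          rcases Nat.lt_or_ge j k with hjk | hjk
          · exact absurd (hbel j hj hjk) (by omega)
          · rw [← hje]; exact pwMono ms hpw hj hjk
      rw [hnext, if_neg hklen, List.getD_eq_getElem ms 0 hklt]
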